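-- pv_equiv track=rewrite | github.com/Coridoris/tesis_cori | Códigos/matriz_clusteringPCA_variables.py | encontrar_intervalos
-- ===== SOURCE A (Python) =====
-- def encontrar_intervalos(lista, valor):
--     intervalos = []
--     inicio = None
--
--     for i, elemento in enumerate(lista):
--         if elemento == valor:
--             if inicio is None:
--                 inicio = i
--         elif inicio is not None:
--             intervalos.append((inicio, i - 1))
--             inicio = None
--
--     # Manejar el caso cuando el último elemento es igual al valor
--     if inicio is not None:
--         intervalos.append((inicio, len(lista) - 1))
--
--     return intervalos
-- ===== SOURCE B (Python) =====
-- def encontrar_intervalos(lista, valor):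
--     # pass 1: collect matching indices; pass 2: group maximal consecutive runs
--     idxs = [i for i, x in enumerate(lista) if x == valor]
--     intervalos = []
--     j = 0
--     for k in range(1, len(idxs) + 1):
--         if k == len(idxs) or idxs[k] != idxs[k - 1] + 1:
--             intervalos.append((idxs[j], idxs[k - 1]))
--             j = k
--     return intervalos
-- ===== Notes on version B (the rewrite author's own statement) =====
-- stated objective: alternative
-- what changed: B first collects all matching indices with enumerate, then a second pass groups maximal runs of consecutive indices at gaps, replacing A's stateful 'inicio' sentinel and post-loop flush.
import Mathlib
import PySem

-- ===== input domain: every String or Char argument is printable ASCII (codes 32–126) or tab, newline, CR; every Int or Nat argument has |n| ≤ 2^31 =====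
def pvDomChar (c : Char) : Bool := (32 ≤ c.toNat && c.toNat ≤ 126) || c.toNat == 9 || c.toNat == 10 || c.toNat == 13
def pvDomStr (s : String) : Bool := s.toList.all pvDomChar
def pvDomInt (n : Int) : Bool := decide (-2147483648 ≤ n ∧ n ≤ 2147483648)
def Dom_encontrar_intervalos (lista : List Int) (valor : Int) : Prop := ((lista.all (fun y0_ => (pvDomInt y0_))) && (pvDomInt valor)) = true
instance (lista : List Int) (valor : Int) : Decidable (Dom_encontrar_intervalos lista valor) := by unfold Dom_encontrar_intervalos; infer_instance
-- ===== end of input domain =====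

-- B rewrites A by a different decomposition: collect matching indices first, then group
-- maximal consecutive runs in a second pass (objective: alternative; same return value).

-- ===== PORT A =====
-- the loop body of A: state = (intervalos, inicio)
def pvStepA (valor : Int) (st : List (Int × Int) × Option Int) (p : Int × Int) :
    List (Int × Int) × Option Int :=
  if p.2 = valor then
    match st.2 with
    | none => (st.1, some p.1)
    | some _ => st
  else
    match st.2 with
    | some inicio => (st.1 ++ [(inicio, p.1 - 1)], none)
    | none => st

def encontrar_intervalos (lista : List Int) (valor : Int) : List (Int × Int) :=
  let st := (PySem.List.enumerate lista).foldl (pvStepA valor) ([], none)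
  match st.2 with
  | some inicio => st.1 ++ [(inicio, (lista.length : Int) - 1)]
  | none => st.1

-- ===== PORT B =====
-- the loop body of B: extend the last run or start a new one
def pvExtendB (runs : List (Int × Int)) (i : Int) : List (Int × Int) :=
  match runs.getLast? with
  | some (a, b) => if i = b + 1 then runs.dropLast ++ [(a, i)] else runs ++ [(i, i)]
  | none => runs ++ [(i, i)]

def encontrar_intervalos_alt (lista : List Int) (valor : Int) : List (Int × Int) :=
  let idxs := ((PySem.List.enumerate lista).filter (fun p => p.2 == valor)).map (·.1)
  idxs.foldl pvExtendB []

-- ===== PRECONDITION & SPEC =====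
def Spec_encontrar_intervalos (lista : List Int) (valor : Int) (out : List (Int × Int)) : Prop := out = encontrar_intervalos_alt lista valor
instance (lista : List Int) (valor : Int) (out : List (Int × Int)) : Decidable (Spec_encontrar_intervalos lista valor out) := by unfold Spec_encontrar_intervalos; infer_instance

-- ===== CLAIM (what is proved, stated in full; the proofs are below) =====
def Claim_equal_encontrar_intervalos : Prop := ∀ (lista : List Int) (valor : Int), Dom_encontrar_intervalos lista valor → Spec_encontrar_intervalos lista valor (encontrar_intervalos lista valor)

-- ===== LEMMAS AND PROOFS =====

-- indices (starting at n) of the elements equal to valor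
def idxsFrom (valor : Int) (n : Int) : List Int → List Int
  | [] => []
  | x :: xs => if x = valor then n :: idxsFrom valor (n + 1) xs else idxsFrom valor (n + 1) xs

-- maximal consecutive runs of an index list, given an open run (a, b)
def groupRuns (a b : Int) : List Int → List (Int × Int)
  | [] => [(a, b)]
  | i :: r => if i = b + 1 then groupRuns a i r else (a, b) :: groupRuns i i r

def groups : List Int → List (Int × Int)
  | [] => []
  | i :: r => groupRuns i i r

theorem idxsFrom_ge (valor : Int) : ∀ (l : List Int) (n i : Int), i ∈ idxsFrom valor n l → n ≤ i := by
  intro l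
  induction l with
  | nil => intro n i h; simp [idxsFrom] at h
  | cons x xs ih =>
    intro n i h
    by_cases hx : x = valor <;> simp [idxsFrom, hx] at h
    · rcases h with h | h
      · omega
      · have := ih (n + 1) i h; omega
    · have := ih (n + 1) i h; omega

-- groupRuns over a list whose elements all exceed b+1 closes the open run immediately
theorem groupRuns_close (a b : Int) (m : List Int) (hm : ∀ i ∈ m, b + 1 < i) :
    groupRuns a b m = (a, b) :: groups m := by
  cases m with
  | nil => simp [groupRuns, groups]
  | cons i r =>
    have : ¬ i = b + 1 := by have := hm i (by simp); omega
    simp [groupRuns, groups, this]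

-- the finishing step of A (flush the open run at final index m - 1)
def finishA (m : Int) (st : List (Int × Int) × Option Int) : List (Int × Int) :=
  match st.2 with
  | some s => st.1 ++ [(s, m - 1)]
  | none => st.1

-- A's suffix semantics: both states at once, by one induction on the suffix
theorem foldA_spec (valor : Int) : ∀ (l : List Int) (n : Int) (acc : List (Int × Int)),
    (finishA (n + l.length) ((PySem.List.enumerate l n).foldl (pvStepA valor) (acc, none))
       = acc ++ groups (idxsFrom valor n l)) ∧
    (∀ s : Int, finishA (n + l.length) ((PySem.List.enumerate l n).foldl (pvStepA valor) (acc, some s))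
       = acc ++ groupRuns s (n - 1) (idxsFrom valor n l)) := by
  intro l
  induction l with
  | nil =>
    intro n acc
    constructor
    · simp [PySem.List.enumerate_nil, finishA, idxsFrom, groups]
    · intro s; simp [PySem.List.enumerate_nil, finishA, idxsFrom, groupRuns]
  | cons x xs ih =>
    intro n acc
    constructor
    · by_cases hx : x = valor
      · rw [PySem.List.enumerate_cons]
        simp only [List.foldl_cons, pvStepA, hx, if_pos rfl, ite_true, ite_false]
        rw [show n + (((valor :: xs)).length : Int) = (n + 1) + (xs.length : Int) by simp; omega]
        rw [(ih (n + 1) acc).2 n]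
        simp [idxsFrom, hx, groups]
      · rw [PySem.List.enumerate_cons]
        simp only [List.foldl_cons, pvStepA, hx, if_neg hx, ite_true, ite_false]
        rw [show n + (((x :: xs)).length : Int) = (n + 1) + (xs.length : Int) by simp; omega]
        rw [(ih (n + 1) acc).1]
        simp [idxsFrom, hx]
    · intro s
      by_cases hx : x = valor
      · rw [PySem.List.enumerate_cons]
        simp only [List.foldl_cons, pvStepA, hx, if_pos rfl, ite_true, ite_false]
        rw [show n + (((valor :: xs)).length : Int) = (n + 1) + (xs.length : Int) by simp; omega]
        rw [(ih (n + 1) acc).2 s]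
        have h2 : idxsFrom valor n (valor :: xs) = n :: idxsFrom valor (n + 1) xs := by
          simp [idxsFrom]
        rw [h2, groupRuns, if_pos (show n = n - 1 + 1 by ring),
          show n + 1 - 1 = n by ring]
      · rw [PySem.List.enumerate_cons]
        simp only [List.foldl_cons, pvStepA, hx, if_neg hx, ite_true, ite_false]
        rw [show n + (((x :: xs)).length : Int) = (n + 1) + (xs.length : Int) by simp; omega]
        rw [(ih (n + 1) (acc ++ [(s, n - 1)])).1]
        have hcl : groupRuns s (n - 1) (idxsFrom valor (n + 1) xs)
            = (s, n - 1) :: groups (idxsFrom valor (n + 1) xs) := by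
          apply groupRuns_close
          intro i hi
          have := idxsFrom_ge valor xs (n + 1) i hi
          omega
        simp [idxsFrom, hx, hcl]

-- B's fold closes into groupRuns
theorem fold_extend : ∀ (r : List Int) (acc : List (Int × Int)) (a b : Int),
    r.foldl pvExtendB (acc ++ [(a, b)]) = acc ++ groupRuns a b r := by
  intro r
  induction r with
  | nil => intro acc a b; simp [groupRuns]
  | cons i r ih =>
    intro acc a b
    simp only [List.foldl_cons]
    have hstep : pvExtendB (acc ++ [(a, b)]) i
        = if i = b + 1 then acc ++ [(a, i)] else (acc ++ [(a, b)]) ++ [(i, i)] := by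
      simp [pvExtendB]
    by_cases hib : i = b + 1
    · rw [hstep, if_pos hib, ih, groupRuns, if_pos hib]
    · rw [hstep, if_neg hib, ih, groupRuns, if_neg hib]
      simp

theorem foldB_groups (m : List Int) : m.foldl pvExtendB [] = groups m := by
  cases m with
  | nil => simp [groups]
  | cons i r =>
    simp only [List.foldl_cons, groups]
    have : pvExtendB [] i = [] ++ [(i, i)] := by simp [pvExtendB]
    rw [this, fold_extend]
    simp

-- B's first pass computes idxsFrom
theorem filter_idxs (valor : Int) : ∀ (l : List Int) (n : Int),
    ((PySem.List.enumerate l n).filter (fun p => p.2 == valor)).map (·.1) = idxsFrom valor n l := by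
  intro l
  induction l with
  | nil => intro n; simp [PySem.List.enumerate_nil, idxsFrom]
  | cons x xs ih =>
    intro n
    rw [PySem.List.enumerate_cons]
    by_cases hx : x = valor <;> simp [idxsFrom, hx, ih (n + 1)]

-- ===== VERDICT (by name: the statement is the Claim_ definition above) =====
theorem encontrar_intervalos_spec : Claim_equal_encontrar_intervalos := by
  intro lista valor _
  unfold Spec_encontrar_intervalos encontrar_intervalos encontrar_intervalos_alt
  rw [filter_idxs, foldB_groups]
  have h := (foldA_spec valor lista 0 []).1
  simp only [zero_add, List.nil_append] at h
  rw [← h]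
  rfl
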